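-- pv_equiv track=rewrite | github.com/kokok22/Algorithm | Programmers/Level_2/Spicy.py | solution
-- ===== SOURCE A (Python) =====
-- import heapq
--
-- def solution(scoville, K):
--     heapq.heapify(scoville)
--
--     count = 0
--     while True:
--         if scoville[0] > K:
--             break
--         elif len(scoville) < 2:
--             return -1
--
--         one = heapq.heappop(scoville)
--         two = heapq.heappop(scoville)
--
--         new = one + (two*2)
--
--         heapq.heappush(scoville, new)
--
--         count += 1
--     return count
-- ===== SOURCE B (Python) =====
-- def solution(scoville, K):
--     # Maintain an explicitly sorted list instead of a heap: sort once, then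
--     # repeatedly take the two smallest from the front and insert the mix back
--     # at its sorted position (linear insertion scan).
--     s = sorted(scoville)
--     count = 0
--     while True:
--         if s[0] > K:
--             return count
--         if len(s) < 2:
--             return -1
--         one, two, s = s[0], s[1], s[2:]
--         new = one + two * 2
--         i = 0
--         while i < len(s) and s[i] <= new:
--             i += 1
--         s.insert(i, new)
--         count += 1
-- ===== Notes on version B (the rewrite author's own statement) =====
-- stated objective: simpler
-- what changed: Replaces the binary min-heap (heapify/heappop/heappush) with an explicitly sorted list: sort once, take the two smallest from the front, and insert the mix back at its sorted position by a linear scan; B also leaves the caller's list unmutated where A heapifies it in place (return values are what is proved equal).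
import Mathlib
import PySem

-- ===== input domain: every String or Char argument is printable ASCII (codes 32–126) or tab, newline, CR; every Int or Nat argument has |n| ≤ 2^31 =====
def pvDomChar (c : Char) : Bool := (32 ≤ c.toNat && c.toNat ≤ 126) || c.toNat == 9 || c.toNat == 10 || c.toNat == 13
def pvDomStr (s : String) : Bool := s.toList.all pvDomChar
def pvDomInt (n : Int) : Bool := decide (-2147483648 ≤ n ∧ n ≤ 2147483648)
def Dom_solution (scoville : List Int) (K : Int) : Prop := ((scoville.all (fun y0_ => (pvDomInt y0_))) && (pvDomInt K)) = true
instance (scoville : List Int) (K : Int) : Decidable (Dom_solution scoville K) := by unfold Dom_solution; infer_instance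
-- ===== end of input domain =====

-- B replaces A's binary min-heap with an explicitly sorted list (sort once, take the
-- two smallest from the front, linear insertion of the mix) — objective: simpler.
-- A mutates its argument in place (heapify); the equivalence proved here is about the
-- RETURN value only.  heapq calls in A are ported by their semantics: the heap root
-- scoville[0] is the minimum, heappop removes the minimum, heappush adds an element.

-- ===== PORT A =====
-- A's loop on the heap: scoville[0] (= the minimum) > K → break with count;
-- len < 2 → -1; else pop two minima, push one + two*2, count += 1.
def solnLoopA (K : Int) (h : List Int) (count : Int) : Int :=
  match hm : PySem.List.min? h (fun x => x) with
  | none => -1          -- scoville[0] on an empty list: IndexError; excluded by Pre_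
  | some one =>
    if one > K then count
    else if h.length < 2 then -1
    else
      match hr : PySem.List.remove? h one with
      | none => -1      -- unreachable: one ∈ h
      | some h1 =>
        match hm2 : PySem.List.min? h1 (fun x => x) with
        | none => -1    -- unreachable: h1 nonempty (len ≥ 2)
        | some two =>
          match hr2 : PySem.List.remove? h1 two with
          | none => -1  -- unreachable: two ∈ h1
          | some h2 => solnLoopA K (h2 ++ [one + two * 2]) (count + 1)
termination_by h.length
decreasing_by
  have hone : one ∈ h := PySem.List.min?_mem hm
  have e1 : PySem.List.remove? h one = some (h.erase one) :=
    PySem.List.remove?_eq_some_erase h one hone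
  rw [hr] at e1
  injection e1 with e1
  subst e1
  have htwo : two ∈ h.erase one := PySem.List.min?_mem hm2
  have e2 : PySem.List.remove? (h.erase one) two = some ((h.erase one).erase two) :=
    PySem.List.remove?_eq_some_erase _ two htwo
  rw [hr2] at e2
  injection e2 with e2
  subst e2
  have a1 : (h.erase one).length = h.length - 1 := List.length_erase_of_mem hone
  have a2 : ((h.erase one).erase two).length = (h.erase one).length - 1 :=
    List.length_erase_of_mem htwo
  have a3 : 0 < (h.erase one).length := List.length_pos_of_mem htwo
  simp only [List.length_append, List.length_cons, List.length_nil, a2, a1]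
  omega

def solution (scoville : List Int) (K : Int) : Int :=
  solnLoopA K scoville 0

-- ===== PORT B =====
-- linear insertion into a sorted list: advance past elements ≤ new, insert there
def insortLin (x : Int) : List Int → List Int
  | [] => [x]
  | y :: ys => if y ≤ x then y :: insortLin x ys else x :: y :: ys

def solnLoopB (K : Int) : List Int → Int → Int
  | [], _ => -1                                   -- s[0]: IndexError; excluded by Pre_
  | [x], count => if x > K then count else -1
  | x :: y :: rest, count =>
      if x > K then count
      else solnLoopB K (insortLin (x + y * 2) rest) (count + 1)
termination_by s => s.length
decreasing_by
  have : (insortLin (x + y * 2) rest).length = rest.length + 1 := by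
    induction rest with
    | nil => simp [insortLin]
    | cons a t ih => simp [insortLin]; split <;> simp [ih]
  simp [this]

def solution_alt (scoville : List Int) (K : Int) : Int :=
  solnLoopB K (PySem.List.sorted scoville (fun x => x)) 0

-- ===== PRECONDITION & SPEC =====
-- Pre_ excludes only the empty list, on which both A and B raise IndexError (scoville[0]).
def Pre_solution (scoville : List Int) (K : Int) : Prop := scoville ≠ []
instance (scoville : List Int) (K : Int) : Decidable (Pre_solution scoville K) := by
  unfold Pre_solution; infer_instance
def pvWitness_solution : List Int × Int := ([1, 2, 3, 9, 10, 12], 7)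

def Spec_solution (scoville : List Int) (K : Int) (out : Int) : Prop := out = solution_alt scoville K
instance (scoville : List Int) (K : Int) (out : Int) : Decidable (Spec_solution scoville K out) := by unfold Spec_solution; infer_instance

-- ===== CLAIM (what is proved, stated in full; the proofs are below) =====
def Claim_equal_solution : Prop := ∀ (scoville : List Int) (K : Int), Dom_solution scoville K → Pre_solution scoville K → Spec_solution scoville K (solution scoville K)

-- ===== LEMMAS AND PROOFS =====

theorem insortLin_perm (x : Int) (l : List Int) : (insortLin x l).Perm (x :: l) := by
  induction l with
  | nil => simp [insortLin]
  | cons y ys ih =>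
    simp only [insortLin]
    split
    · exact ((ih.cons y).trans (List.Perm.swap x y ys))
    · exact List.Perm.refl _

theorem insortLin_pairwise (x : Int) (l : List Int)
    (hl : l.Pairwise (· ≤ ·)) : (insortLin x l).Pairwise (· ≤ ·) := by
  induction l with
  | nil => simp [insortLin]
  | cons y ys ih =>
    simp only [insortLin]
    rcases List.pairwise_cons.mp hl with ⟨hy, hys⟩
    split
    · rename_i hyx
      refine List.pairwise_cons.mpr ⟨?_, ih hys⟩
      intro z hz
      rcases List.mem_cons.mp (((insortLin_perm x ys).mem_iff).mp hz) with hzx | hzys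
      · rw [hzx]; exact hyx
      · exact hy z hzys
    · rename_i hyx
      have hxy : x < y := lt_of_not_ge hyx
      refine List.pairwise_cons.mpr ⟨?_, hl⟩
      intro z hz
      rcases List.mem_cons.mp hz with rfl | hzys
      · exact le_of_lt hxy
      · exact le_of_lt (lt_of_lt_of_le hxy (hy z hzys))

-- the head of sorted h is the value of min? h
theorem head_sorted_eq_min (h : List Int) (m x : Int) (t : List Int)
    (hm : PySem.List.min? h (fun z => z) = some m)
    (hs : PySem.List.sorted h (fun z => z) = x :: t) : x = m := by
  have hxh : x ∈ h := (PySem.List.mem_sorted h (fun z => z) false x).mp (by rw [hs]; simp)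
  have hmh : m ∈ h := PySem.List.min?_mem hm
  exact le_antisymm (PySem.List.key_head_sorted_le h (fun z => z) hs m hmh)
                    (PySem.List.min?_isMin hm x hxh)

-- removing the minimum from h corresponds to dropping the head of sorted h
theorem sorted_erase_head (h : List Int) (x : Int) (t : List Int)
    (hs : PySem.List.sorted h (fun z => z) = x :: t) :
    PySem.List.sorted (h.erase x) (fun z => z) = t := by
  have hperm : (x :: t).Perm h := by rw [← hs]; exact PySem.List.sorted_perm h _ false
  have hp : t.Perm (h.erase x) := by
    have := hperm.erase x
    simpa using this
  have hpw : (x :: t).Pairwise (fun a b => a ≤ b) := by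
    have := PySem.List.sorted_pairwise h (fun z => z)
    rwa [hs] at this
  exact PySem.List.sorted_id_eq_of_perm_of_pairwise _ _ hp (List.pairwise_cons.mp hpw).2

-- main loop correspondence: A's heap loop equals B's sorted-list loop
theorem loopAB (K : Int) : ∀ (n : Nat) (h : List Int) (count : Int),
    h.length ≤ n → h ≠ [] →
    solnLoopA K h count = solnLoopB K (PySem.List.sorted h (fun x => x)) count := by
  intro n
  induction n with
  | zero => intro h count hlen hne; cases h <;> simp_all
  | succ n ih =>
    intro h count hlen hne
    obtain ⟨x, t, hs⟩ : ∃ x t, PySem.List.sorted h (fun z => z) = x :: t := by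
      cases e : PySem.List.sorted h (fun z => z) with
      | nil => exact absurd ((PySem.List.sorted_eq_nil_iff h _ false).mp e) hne
      | cons a s => exact ⟨a, s, rfl⟩
    have hslen : (PySem.List.sorted h (fun z => z)).length = h.length :=
      (PySem.List.sorted_perm h _ false).length_eq
    rw [solnLoopA.eq_def]
    split
    · rename_i heq
      exact absurd ((PySem.List.min?_eq_none_iff h _).mp heq) hne
    · rename_i m hm
      have hxm : x = m := head_sorted_eq_min h m x t hm hs
      subst hxm
      rw [hs]
      by_cases hK : x > K
      · rw [if_pos hK]
        cases t <;> simp [solnLoopB, hK]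
      · rw [if_neg hK]
        by_cases h2 : h.length < 2
        · -- singleton: sorted h = [x]
          rw [if_pos h2]
          have : t = [] := by
            have hl1 : (x :: t).length = h.length := by rw [← hs]; exact hslen
            rw [List.length_cons] at hl1
            cases t with
            | nil => rfl
            | cons a s => exfalso; rw [List.length_cons] at hl1; omega
          subst this
          simp [solnLoopB, hK]
        · rw [if_neg h2]
          have hmh : x ∈ h := PySem.List.min?_mem hm
          have hst : PySem.List.sorted (h.erase x) (fun z => z) = t := sorted_erase_head h x t hs
          obtain ⟨y, rest, rfl⟩ : ∃ y rest, t = y :: rest := by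
            cases t with
            | nil =>
              have hl1 : (x :: ([] : List Int)).length = h.length := by rw [← hs]; exact hslen
              rw [List.length_cons, List.length_nil] at hl1; omega
            | cons a s => exact ⟨a, s, rfl⟩
          split
          · rename_i hr
            rw [PySem.List.remove?_eq_some_erase h x hmh] at hr
            cases hr
          · rename_i h1 hr
            rw [PySem.List.remove?_eq_some_erase h x hmh] at hr
            injection hr with hr
            subst hr
            split
            · rename_i hm2
              have hex : h.erase x = [] := (PySem.List.min?_eq_none_iff _ _).mp hm2
              have hnil : (PySem.List.sorted ([] : List Int) fun z => z) = [] :=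
                (PySem.List.sorted_eq_nil_iff _ _ false).mpr rfl
              rw [hex, hnil] at hst
              cases hst
            · rename_i m2 hm2
              have hym : y = m2 := head_sorted_eq_min (h.erase x) m2 y rest hm2 hst
              subst hym
              have hm2mem : y ∈ h.erase x := PySem.List.min?_mem hm2
              split
              · rename_i hr2
                rw [PySem.List.remove?_eq_some_erase _ y hm2mem] at hr2
                cases hr2
              · rename_i h2' hr2
                rw [PySem.List.remove?_eq_some_erase _ y hm2mem] at hr2
                injection hr2 with hr2
                subst hr2
                have hsr : PySem.List.sorted ((h.erase x).erase y) (fun z => z) = rest :=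
                  sorted_erase_head (h.erase x) y rest hst
                set new := x + y * 2 with hnew
                have hrep : PySem.List.sorted ((h.erase x).erase y ++ [new]) (fun z => z) =
                    insortLin new rest := by
                  have hperm : (insortLin new rest).Perm ((h.erase x).erase y ++ [new]) := by
                    have p1 : (insortLin new rest).Perm (new :: rest) := insortLin_perm new rest
                    have p2 : rest.Perm ((h.erase x).erase y) := by
                      rw [← hsr]; exact PySem.List.sorted_perm _ _ false
                    exact p1.trans ((p2.cons new).trans (List.perm_append_singleton new _).symm)
                  have hpw : (insortLin new rest).Pairwise (fun a b => a ≤ b) := by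
                    refine insortLin_pairwise new rest ?_
                    have hpws := PySem.List.sorted_pairwise h (fun z => z)
                    rw [hs] at hpws
                    exact ((List.pairwise_cons.mp (List.pairwise_cons.mp hpws).2).2)
                  exact PySem.List.sorted_id_eq_of_perm_of_pairwise _ _ hperm hpw
                have hlen2 : ((h.erase x).erase y ++ [new]).length ≤ n := by
                  have e1 : (h.erase x).length = h.length - 1 := List.length_erase_of_mem hmh
                  have e2 : ((h.erase x).erase y).length = (h.erase x).length - 1 :=
                    List.length_erase_of_mem hm2mem
                  simp only [List.length_append, List.length_cons, List.length_nil, e2, e1]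
                  omega
                have hne2 : (h.erase x).erase y ++ [new] ≠ [] := by simp
                rw [ih _ _ hlen2 hne2, hrep]
                simp only [solnLoopB, if_neg hK]
                rw [hnew]

-- ===== VERDICT (by name: the statement is the Claim_ definition above) =====
theorem solution_spec : Claim_equal_solution := by
  intro scoville K _ hpre
  unfold Spec_solution solution solution_alt
  exact loopAB K scoville.length scoville 0 le_rfl hpre
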